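-- pv_equiv track=rewrite | github.com/enternityFan/LeetCodePythonVersion | 字符串/1694. 重新格式化电话号码.py | reformatNumber
-- ===== SOURCE A (Python) =====
-- def reformatNumber(number: str) -> str:
--     number = number.replace(" ","").replace("-","")
--     ans = ""
--     i = 0
--     while i <len(number):
--         tmp = len(number ) - i
--         if tmp<=4:
--             if tmp == 4:
--                 ans +=number[i:i+2] + "-" + number[i+2:]
--             else:
--                 ans +=number[i:]
--             break
--
--
--         else:
--
--             ans +=number[i:i+3] + "-"
--             i +=3
--     return ans
-- ===== SOURCE B (Python) =====
-- def reformatNumber(number: str) -> str: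
--     s = number.replace(" ", "").replace("-", "")
--     n = len(s)
--     r = n % 3
--     body = n - 4 if r == 1 else n - r
--     chunks = [s[i:i+3] for i in range(0, max(body, 0), 3)]
--     if r == 1:
--         if n >= 4:
--             chunks += [s[-4:-2], s[-2:]]
--         else:
--             chunks = [s]
--     elif r == 2:
--         chunks.append(s[-2:])
--     return "-".join(chunks)
-- ===== Notes on version B (the rewrite author's own statement) =====
-- stated objective: idiomatic
-- what changed: A scans with a while loop that re-decides the tail shape every iteration and grows the answer by repeated string concatenation; B decides the tail shape once from len % 3, slices the body in steps of 3 with a comprehension and joins the chunks with a dash separator.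
import Mathlib
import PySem

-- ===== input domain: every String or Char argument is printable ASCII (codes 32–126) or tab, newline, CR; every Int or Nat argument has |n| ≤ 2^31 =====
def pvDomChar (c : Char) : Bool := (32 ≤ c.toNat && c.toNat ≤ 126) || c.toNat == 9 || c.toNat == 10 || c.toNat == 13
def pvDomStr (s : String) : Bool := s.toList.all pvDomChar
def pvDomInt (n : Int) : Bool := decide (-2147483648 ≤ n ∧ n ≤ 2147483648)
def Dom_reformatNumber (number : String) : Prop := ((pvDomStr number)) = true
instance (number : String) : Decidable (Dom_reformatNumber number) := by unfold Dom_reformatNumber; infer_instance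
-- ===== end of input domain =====

-- B replaces A's per-iteration while loop by a length-driven decomposition: the tail shape is
-- decided up front from len % 3 and the body is sliced in steps of 3 and joined (objective: idiomatic).

-- ===== PORT A =====
-- the while loop of A: i is the scan index, ans the accumulated output
def pvALoop (s : List Char) (i : Nat) (ans : List Char) : List Char :=
  if i < s.length then
    let tmp := s.length - i
    if tmp ≤ 4 then
      if tmp = 4 then
        ans ++ PySem.List.slice s (some (i : Int)) (some ((i : Int) + 2)) ++ ['-'] ++
          PySem.List.slice s (some ((i : Int) + 2)) none
      else
        ans ++ PySem.List.slice s (some (i : Int)) none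
    else
      pvALoop s (i + 3) (ans ++ PySem.List.slice s (some (i : Int)) (some ((i : Int) + 3)) ++ ['-'])
  else ans
termination_by s.length - i
decreasing_by omega

def reformatNumber (number : String) : String :=
  let number' := PySem.Str.replace (PySem.Str.replace number " " "") "-" ""
  String.mk (pvALoop number'.toList 0 [])

-- ===== PORT B =====
def reformatNumber_alt (number : String) : String :=
  let s := PySem.Str.replace (PySem.Str.replace number " " "") "-" ""
  let cs := s.toList
  let n : Int := cs.length
  let r : Int := PySem.Int.mod n 3
  let body : Int := if r = 1 then n - 4 else n - r
  let chunks := (PySem.List.pyRange 0 (max body 0) 3).map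
    (fun i => PySem.List.slice cs (some i) (some (i + 3)))
  let chunks :=
    if r = 1 then
      if n ≥ 4 then
        chunks ++ [PySem.List.slice cs (some (-4)) (some (-2)), PySem.List.slice cs (some (-2)) none]
      else [cs]
    else if r = 2 then chunks ++ [PySem.List.slice cs (some (-2)) none]
    else chunks
  String.mk (PySem.Chars.join ['-'] chunks)

-- ===== PRECONDITION & SPEC =====
def Spec_reformatNumber (number : String) (out : String) : Prop := out = reformatNumber_alt number
instance (number : String) (out : String) : Decidable (Spec_reformatNumber number out) := by unfold Spec_reformatNumber; infer_instance

-- ===== CLAIM (what is proved, stated in full; the proofs are below) =====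
def Claim_equal_reformatNumber : Prop := ∀ (number : String), Dom_reformatNumber number → Spec_reformatNumber number (reformatNumber number)

-- ===== LEMMAS AND PROOFS =====

-- clean recursive characterisation of the grouping both programs compute: the chunk list
def pvChunks (cs : List Char) : List (List Char) :=
  if cs.length ≤ 4 then
    if cs.length = 4 then [cs.take 2, cs.drop 2]
    else if cs = [] then [] else [cs]
  else cs.take 3 :: pvChunks (cs.drop 3)
termination_by cs.length
decreasing_by simp; omega

-- B's chunk list as a standalone function (definitionally the middle of reformatNumber_alt)
def pvBChunks (cs : List Char) : List (List Char) :=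
  let n : Int := cs.length
  let r : Int := PySem.Int.mod n 3
  let body : Int := if r = 1 then n - 4 else n - r
  let chunks := (PySem.List.pyRange 0 (max body 0) 3).map
    (fun i => PySem.List.slice cs (some i) (some (i + 3)))
  if r = 1 then
    if n ≥ 4 then
      chunks ++ [PySem.List.slice cs (some (-4)) (some (-2)), PySem.List.slice cs (some (-2)) none]
    else [cs]
  else if r = 2 then chunks ++ [PySem.List.slice cs (some (-2)) none]
  else chunks

lemma alt_eq (number : String) :
    reformatNumber_alt number = String.mk (PySem.Chars.join ['-']
      (pvBChunks (PySem.Str.replace (PySem.Str.replace number " " "") "-" "").toList)) := rfl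

lemma join_cons_of_ne_nil (sep x : List Char) (l : List (List Char)) (h : l ≠ []) :
    PySem.Chars.join sep (x :: l) = x ++ sep ++ PySem.Chars.join sep l := by
  cases l with
  | nil => exact absurd rfl h
  | cons q rest => exact PySem.Chars.join_cons_cons sep x q rest

lemma pvChunks_ne_nil (cs : List Char) (h : cs ≠ []) : pvChunks cs ≠ [] := by
  unfold pvChunks
  split_ifs <;> simp_all

-- A's loop equals the clean recursion on the dropped suffix
lemma pvALoop_eq_aux (k : Nat) : ∀ (i : Nat) (ans s : List Char), s.length - i ≤ k →
    pvALoop s i ans = ans ++ PySem.Chars.join ['-'] (pvChunks (s.drop i)) := by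
  induction k with
  | zero =>
    intro i ans s hk
    have hge : s.length ≤ i := by omega
    rw [pvALoop, if_neg (by omega)]
    rw [List.drop_eq_nil_of_le hge]
    rw [pvChunks]
    simp [PySem.Chars.join_nil]
  | succ k ih =>
    intro i ans s hk
    by_cases h : i < s.length
    · set d := s.drop i with hd
      have hdl : d.length = s.length - i := by simp [hd]
      rw [pvALoop, if_pos h]
      by_cases h4 : s.length - i ≤ 4
      · rw [if_pos h4]
        by_cases he : s.length - i = 4
        · rw [if_pos he]
          have h1 : PySem.List.slice s (some (i : Int)) (some ((i : Int) + 2)) = d.take 2 := by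
            have : ((i : Int) + 2) = ((i + 2 : Nat) : Int) := by push_cast; ring
            rw [this, PySem.List.slice_natCast, hd]
            congr 1; omega
          have h2 : PySem.List.slice s (some ((i : Int) + 2)) none = d.drop 2 := by
            have : ((i : Int) + 2) = ((i + 2 : Nat) : Int) := by push_cast; ring
            rw [this, PySem.List.slice_from s (by positivity), hd, List.drop_drop]
            congr 1
          rw [h1, h2, pvChunks, if_pos (by omega), if_pos (by omega : d.length = 4)]
          rw [PySem.Chars.join_cons_cons, PySem.Chars.join_singleton]
          simp
        · rw [if_neg he]
          have h1 : PySem.List.slice s (some (i : Int)) none = d := by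
            rw [PySem.List.slice_from s (by positivity), hd]; simp
          have hne : d ≠ [] := by
            intro hc; rw [hc] at hdl; simp at hdl; omega
          rw [h1, pvChunks, if_pos (by omega), if_neg (by omega), if_neg hne,
            PySem.Chars.join_singleton]
      · rw [if_neg h4]
        have h1 : PySem.List.slice s (some (i : Int)) (some ((i : Int) + 3)) = d.take 3 := by
          have : ((i : Int) + 3) = ((i + 3 : Nat) : Int) := by push_cast; ring
          rw [this, PySem.List.slice_natCast, hd]
          congr 1; omega
        rw [h1, ih (i + 3) _ s (by omega)]
        have hdrop : s.drop (i + 3) = d.drop 3 := by rw [hd, List.drop_drop]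
        rw [hdrop]
        have hne : d.drop 3 ≠ [] := by
          intro hc
          have := congrArg List.length hc
          simp [hdl] at this; omega
        conv_rhs => rw [pvChunks, if_neg (by omega)]
        rw [join_cons_of_ne_nil _ _ _ (pvChunks_ne_nil _ hne)]
        simp
    · rw [pvALoop, if_neg h]
      rw [List.drop_eq_nil_of_le (by omega)]
      rw [pvChunks]
      simp [PySem.Chars.join_nil]

lemma pvALoop_eq (i : Nat) (ans s : List Char) :
    pvALoop s i ans = ans ++ PySem.Chars.join ['-'] (pvChunks (s.drop i)) :=
  pvALoop_eq_aux (s.length - i) i ans s le_rfl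

-- the body chunks of B, as a map over List.range
lemma pvBody_eq (cs : List Char) (m : Nat) :
    (PySem.List.pyRange 0 ((3 * m : Nat) : Int) 3).map
      (fun i => PySem.List.slice cs (some i) (some (i + 3))) =
    (List.range m).map (fun k => (cs.drop (3 * k)).take 3) := by
  rw [PySem.List.pyRange_of_pos 0 _ (by norm_num)]
  have hb : (if (0:Int) < ((3*m:Nat):Int) then ((((3*m:Nat):Int) - 0 + 3 - 1)/3).toNat else 0) = m := by
    split_ifs with h
    · omega
    · omega
  rw [hb, List.map_map]
  apply List.map_congr_left
  intro k _
  have h1 : ((0:Int) + 3 * (k:Int)) = ((3*k : Nat) : Int) := by push_cast; ring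
  have h2 : ((0:Int) + 3 * (k:Int) + 3) = ((3*k + 3 : Nat) : Int) := by push_cast; ring
  show PySem.List.slice cs (some (0 + 3 * (k:Int))) (some (0 + 3 * (k:Int) + 3)) = _
  rw [h2, h1, PySem.List.slice_natCast]
  congr 1
  omega

lemma slice2_shift (cs : List Char) (h : 5 ≤ cs.length) :
    PySem.List.slice cs (some (-2)) none = PySem.List.slice (cs.drop 3) (some (-2)) none := by
  simp [PySem.List.slice, PySem.List.clampIdx, List.drop_drop]
  rw [if_neg (by omega), if_neg (by omega)]
  congr 1
  · omega
  · congr 1; omega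

lemma slice4_shift (cs : List Char) (h : 7 ≤ cs.length) :
    PySem.List.slice cs (some (-4)) (some (-2)) = PySem.List.slice (cs.drop 3) (some (-4)) (some (-2)) := by
  simp [PySem.List.slice, PySem.List.clampIdx, List.drop_drop]
  rw [if_neg (by omega), if_neg (by omega), if_neg (by omega), if_neg (by omega)]
  congr 1
  · omega
  · congr 1; omega

lemma pvBody_peel (cs : List Char) (m : Nat) :
    (List.range (m+1)).map (fun k => (cs.drop (3*k)).take 3)
      = cs.take 3 :: (List.range m).map (fun k => ((cs.drop 3).drop (3*k)).take 3) := by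
  rw [List.range_succ_eq_map, List.map_cons, List.map_map]
  simp only [Nat.mul_zero, List.drop_zero]
  congr 1
  apply List.map_congr_left
  intro k _
  simp only [Function.comp, List.drop_drop]
  congr 2
  omega

-- for 5 ≤ len, B's chunk list peels its first 3-chunk
lemma pvBChunks_shift (cs : List Char) (h5 : 5 ≤ cs.length) :
    pvBChunks cs = cs.take 3 :: pvBChunks (cs.drop 3) := by
  have hd : (cs.drop 3).length = cs.length - 3 := by simp
  unfold pvBChunks
  have hmodL : PySem.Int.mod (cs.length : Int) 3 = ((cs.length % 3 : Nat) : Int) := by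
    exact_mod_cast PySem.Int.mod_natCast cs.length 3
  have hmodL' : PySem.Int.mod ((cs.length - 3 : Nat) : Int) 3 = ((cs.length % 3 : Nat) : Int) := by
    rw [show cs.length % 3 = (cs.length - 3) % 3 from by omega]
    exact_mod_cast PySem.Int.mod_natCast (cs.length - 3) 3
  simp only [hd, hmodL, hmodL']
  rcases h3 : cs.length % 3 with _ | _ | k
  · -- r = 0
    obtain ⟨m, hm⟩ : ∃ m, cs.length = 3*(m+1) := ⟨cs.length/3 - 1, by omega⟩
    norm_num
    rw [show ((cs.length : Int)) = ((3*(m+1) : Nat) : Int) from by exact_mod_cast hm,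
        show (((cs.length - 3 : Nat)) : Int) = ((3*m : Nat) : Int) from by push_cast; omega]
    rw [pvBody_eq, pvBody_eq, pvBody_peel]
  · -- r = 1, so cs.length ≥ 7
    have h7 : 7 ≤ cs.length := by omega
    norm_num
    have e1 : max ((cs.length : Int) - 4) 0 = ((3*((cs.length - 4)/3) : Nat) : Int) := by
      push_cast; omega
    have e2 : max (((cs.length - 3 : Nat) : Int) - 4) 0 = ((3*((cs.length - 7)/3) : Nat) : Int) := by
      push_cast; omega
    rw [if_pos (show 4 ≤ cs.length by omega), if_pos (show 4 ≤ cs.length - 3 by omega),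
        e1, e2, pvBody_eq, pvBody_eq]
    rw [show (cs.length - 4)/3 = (cs.length - 7)/3 + 1 by omega, pvBody_peel]
    rw [slice4_shift cs h7, slice2_shift cs h5]
    simp
  · -- r = 2
    rcases k with _ | k
    · obtain ⟨m, hm⟩ : ∃ m, cs.length = 3*(m+1) + 2 := ⟨(cs.length - 5)/3, by omega⟩
      norm_num
      have e1 : max ((cs.length : Int) - 2) 0 = ((3*(m+1) : Nat) : Int) := by push_cast; omega
      have e2 : max (((cs.length - 3 : Nat) : Int) - 2) 0 = ((3*m : Nat) : Int) := by push_cast; omega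
      rw [e1, e2, pvBody_eq, pvBody_eq, pvBody_peel, slice2_shift cs h5]
      simp
    · omega

-- B's chunk list equals the clean recursion
lemma pvBChunks_eq_aux (N : Nat) : ∀ cs : List Char, cs.length ≤ N → pvBChunks cs = pvChunks cs := by
  induction N with
  | zero =>
    intro cs h
    have : cs = [] := by
      cases cs
      · rfl
      · simp at h
    subst this
    rw [pvChunks]
    norm_num
    decide
  | succ N ih =>
    intro cs hle
    by_cases h5 : 5 ≤ cs.length
    · rw [pvBChunks_shift cs h5, ih (cs.drop 3) (by simp; omega)]
      conv_rhs => rw [pvChunks, if_neg (by omega)]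
    · have : cs.length = 0 ∨ cs.length = 1 ∨ cs.length = 2 ∨ cs.length = 3 ∨ cs.length = 4 := by omega
      rcases this with hn | hn | hn | hn | hn
      · have : cs = [] := by cases cs; rfl; simp at hn
        subst this
        rw [pvChunks]
        norm_num
        decide
      · -- n = 1
        rw [pvChunks, if_pos (by omega), if_neg (by omega), if_neg (by intro hc; subst hc; simp at hn)]
        unfold pvBChunks
        rw [hn]
        norm_num
      · -- n = 2
        rw [pvChunks, if_pos (by omega), if_neg (by omega), if_neg (by intro hc; subst hc; simp at hn)]
        unfold pvBChunks
        rw [hn]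
        norm_num
        have : PySem.List.pyRange 0 0 3 = [] := by decide
        rw [this]
        simp [PySem.List.slice, PySem.List.clampIdx, hn]
      · -- n = 3
        rw [pvChunks, if_pos (by omega), if_neg (by omega), if_neg (by intro hc; subst hc; simp at hn)]
        unfold pvBChunks
        rw [hn]
        norm_num
        refine ⟨0, by decide, ?_⟩
        simp [PySem.List.slice, PySem.List.clampIdx, hn]
      · -- n = 4
        rw [pvChunks, if_pos (by omega), if_pos (by omega)]
        unfold pvBChunks
        rw [hn]
        norm_num
        have : PySem.List.pyRange 0 0 3 = [] := by decide
        rw [this]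
        simp [PySem.List.slice, PySem.List.clampIdx, hn]

lemma pvBChunks_eq (cs : List Char) : pvBChunks cs = pvChunks cs :=
  pvBChunks_eq_aux cs.length cs le_rfl

-- ===== VERDICT (by name: the statement is the Claim_ definition above) =====
theorem reformatNumber_spec : Claim_equal_reformatNumber := by
  intro number _
  unfold Spec_reformatNumber
  rw [alt_eq, pvBChunks_eq]
  show String.mk (pvALoop _ 0 []) = _
  rw [pvALoop_eq]
  simp
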